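-- pv_equiv track=rewrite | github.com/Verirule/Verirule | apps/api/app/worker/notification_sender.py | _dedupe_recipient_targets
-- ===== SOURCE A (Python) =====
-- def _dedupe_recipient_targets(value: list[dict[str, str]]) -> list[dict[str, str]]:
--     seen: set[str] = set()
--     deduped: list[dict[str, str]] = []
--     for row in sorted(value, key=lambda item: (item["email"], item["user_id"])):
--         email = row["email"]
--         if email in seen:
--             continue
--         seen.add(email)
--         deduped.append(row)
--     return deduped
-- ===== SOURCE B (Python) =====
-- def _dedupe_recipient_targets(value: list[dict[str, str]]) -> list[dict[str, str]]:
--     chosen: dict[str, dict[str, str]] = {}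
--     for row in value:
--         email = row["email"]
--         cur = chosen.get(email)
--         chosen[email] = row if cur is None or row["user_id"] < cur["user_id"] else cur
--     return sorted(chosen.values(), key=lambda r: r["email"])
-- ===== Notes on version B (the rewrite author's own statement) =====
-- stated objective: simpler
-- what changed: Replaces 'sort all rows then scan with a seen-set' by one linear pass building a dict keyed by email that keeps the row with the smallest user_id (first seen on ties), then sorts only the unique winners by email.
import Mathlib
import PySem

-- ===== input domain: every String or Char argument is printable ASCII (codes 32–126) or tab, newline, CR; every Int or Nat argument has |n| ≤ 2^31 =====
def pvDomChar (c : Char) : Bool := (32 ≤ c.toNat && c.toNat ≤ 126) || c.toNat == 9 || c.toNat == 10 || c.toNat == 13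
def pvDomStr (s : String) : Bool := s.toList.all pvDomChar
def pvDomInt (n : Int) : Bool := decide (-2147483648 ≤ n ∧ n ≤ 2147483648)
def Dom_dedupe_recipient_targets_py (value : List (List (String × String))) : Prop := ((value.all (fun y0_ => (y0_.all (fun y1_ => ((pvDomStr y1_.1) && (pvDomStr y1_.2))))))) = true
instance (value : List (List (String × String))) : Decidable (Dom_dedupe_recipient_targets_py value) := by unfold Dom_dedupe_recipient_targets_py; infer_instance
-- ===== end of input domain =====

-- B replaces A's "sort every row, then scan with a seen-set" by a single pass building a
-- dict of per-email winners followed by a sort of the unique winners only (objective: simpler).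
-- Return-value equivalence only; neither version mutates its argument.

-- ===== PORT A =====
-- row[k] for a dict row: first-match association lookup; under Pre_ the key is always
-- present, so the "" default is never reached (Python raises KeyError exactly where
-- Pre_ excludes the input).
def pvGet (row : List (String × String)) (k : String) : String :=
  match row.find? (fun p => p.1 == k) with
  | some p => p.2
  | none => ""

def dedupe_recipient_targets_py (value : List (List (String × String))) : List (List (String × String)) :=
  ((PySem.List.sorted2 value (fun r => pvGet r "email") (fun r => pvGet r "user_id")).foldl
    (fun (st : PySem.Set String × List (List (String × String))) row =>
      let email := pvGet row "email"
      if PySem.Set.contains st.1 email then st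
      else (PySem.Set.add st.1 email, st.2 ++ [row]))
    (PySem.Set.empty, [])).2

-- ===== PORT B =====
def dedupe_recipient_targets_py_alt (value : List (List (String × String))) : List (List (String × String)) :=
  let chosen := value.foldl
    (fun (d : PySem.Dict String (List (String × String))) row =>
      let email := pvGet row "email"
      d.insert email
        (match d.get? email with
         | none => row
         | some cur => if pvGet row "user_id" < pvGet cur "user_id" then row else cur))
    PySem.Dict.empty
  PySem.List.sorted chosen.values (fun r => pvGet r "email")

-- ===== PRECONDITION & SPEC =====
-- Pre_: every row carries the keys "email" and "user_id"; elsewhere Python A raises KeyError.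
def Pre_dedupe_recipient_targets_py (value : List (List (String × String))) : Prop :=
  ∀ row ∈ value, (row.find? (fun p => p.1 == "email")).isSome = true ∧
                 (row.find? (fun p => p.1 == "user_id")).isSome = true
instance (value : List (List (String × String))) : Decidable (Pre_dedupe_recipient_targets_py value) := by
  unfold Pre_dedupe_recipient_targets_py; infer_instance

def pvWitness_dedupe_recipient_targets_py : (List (List (String × String))) :=
  [[("email", "a@x.com"), ("user_id", "1")], [("email", "a@x.com"), ("user_id", "2")]]

def Spec_dedupe_recipient_targets_py (value : List (List (String × String))) (out : List (List (String × String))) : Prop := out = dedupe_recipient_targets_py_alt value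
instance (value : List (List (String × String))) (out : List (List (String × String))) : Decidable (Spec_dedupe_recipient_targets_py value out) := by unfold Spec_dedupe_recipient_targets_py; infer_instance

-- ===== CLAIM (what is proved, stated in full; the proofs are below) =====
def Claim_equal_dedupe_recipient_targets_py : Prop := ∀ (value : List (List (String × String))), Dom_dedupe_recipient_targets_py value → Pre_dedupe_recipient_targets_py value → Spec_dedupe_recipient_targets_py value (dedupe_recipient_targets_py value)

-- ===== LEMMAS AND PROOFS =====

-- projections of a row on the two keys both programs use
def eM (r : List (String × String)) : String := pvGet r "email"
def uI (r : List (String × String)) : String := pvGet r "user_id"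

theorem eM_def (r : List (String × String)) : pvGet r "email" = eM r := rfl

-- the lexicographic "strictly before" test that PySem.List.sorted2 uses on these keys
def lexB (a b : List (String × String)) : Bool :=
  decide (eM a < eM b) || (!decide (eM b < eM a) && decide (uI a < uI b))

-- the canonical one-row-per-email update: replace the winner of x's email when x's
-- user_id is strictly smaller, otherwise insert x at its email-sorted position
def upd (x : List (String × String)) : List (List (String × String)) → List (List (String × String))
  | [] => [x]
  | r :: rs =>
    if eM r == eM x then (if uI x < uI r then x :: rs else r :: rs)
    else if eM x < eM r then x :: r :: rs
    else r :: upd x rs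

def Phi (value : List (List (String × String))) : List (List (String × String)) :=
  value.foldl (fun out row => upd row out) []

-- first row of each email, in list order
def dF : List (List (String × String)) → List (List (String × String))
  | [] => []
  | r :: rs => r :: dF (rs.filter (fun x => !(eM x == eM r)))
termination_by l => l.length
decreasing_by simp only [List.length_unattach]; exact Nat.lt_succ_of_le (le_trans (List.length_filter_le _ _) (by simp))

-- same, with an explicit already-seen set
def dFs (s : PySem.Set String) : List (List (String × String)) → List (List (String × String))
  | [] => []
  | r :: rs =>
    if PySem.Set.contains s (eM r) then dFs s rs
    else r :: dFs (PySem.Set.add s (eM r)) rs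

def fB (e : String) (l : List (List (String × String))) : Option (List (String × String)) :=
  l.find? (fun r => eM r == e)

-- sortedness relation maintained by insertion sort with lexB
def Rle (a b : List (String × String)) : Prop := lexB b a = false

theorem lexB_asymm {a b : List (String × String)} (h : lexB a b = true) : lexB b a = false := by
  simp only [lexB, Bool.or_eq_true, Bool.and_eq_true, Bool.not_eq_true', decide_eq_true_eq,
    decide_eq_false_iff_not] at h
  simp only [lexB, Bool.or_eq_false_iff, Bool.and_eq_false_iff, Bool.not_eq_false',
    decide_eq_true_eq, decide_eq_false_iff_not]
  rcases h with h | ⟨h1, h2⟩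
  · exact ⟨lt_asymm h, Or.inl h⟩
  · exact ⟨h1, Or.inr (not_lt_of_gt h2)⟩

theorem lexB_trans {a b c : List (String × String)} (h1 : lexB a b = true) (h2 : lexB b c = true) :
    lexB a c = true := by
  simp only [lexB, Bool.or_eq_true, Bool.and_eq_true, Bool.not_eq_true', decide_eq_true_eq,
    decide_eq_false_iff_not] at *
  rcases h1 with h1 | ⟨h1a, h1b⟩ <;> rcases h2 with h2 | ⟨h2a, h2b⟩
  · exact Or.inl (lt_trans h1 h2)
  · rcases lt_trichotomy (eM a) (eM c) with h | h | h
    · exact Or.inl h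
    · exact absurd (h ▸ h1) h2a
    · exact absurd (lt_trans h h1) h2a
  · rcases lt_trichotomy (eM a) (eM c) with h | h | h
    · exact Or.inl h
    · exact absurd (h ▸ h2) h1a
    · exact absurd (lt_trans h2 h) h1a
  · refine Or.inr ⟨fun hca => ?_, lt_trans h1b h2b⟩
    rcases lt_trichotomy (eM a) (eM b) with h | h | h
    · exact h2a (lt_trans hca h)
    · exact h2a (h ▸ hca)
    · exact h1a h

theorem lexB_trans_neg {a b c : List (String × String)} (h1 : lexB a b = true) (h2 : lexB c b = false) :
    lexB a c = true := by
  simp only [lexB, Bool.or_eq_true, Bool.and_eq_true, Bool.not_eq_true', decide_eq_true_eq,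
    decide_eq_false_iff_not, Bool.or_eq_false_iff, Bool.and_eq_false_iff,
    Bool.not_eq_false'] at *
  rcases h2 with ⟨h2a, h2b⟩
  rcases h1 with h1 | ⟨h1a, h1b⟩
  · rcases lt_trichotomy (eM a) (eM c) with h | h | h
    · exact Or.inl h
    · exact absurd (h ▸ h1) h2a
    · exact absurd (lt_trans h h1) h2a
  · rcases h2b with h2b | h2b
    · rcases lt_trichotomy (eM a) (eM c) with h | h | h
      · exact Or.inl h
      · exact absurd (h ▸ h2b) h1a
      · exact absurd (lt_trans h2b h) h1a
    · refine Or.inr ⟨fun hca => ?_, lt_of_lt_of_le h1b h2b⟩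
      rcases lt_trichotomy (eM a) (eM b) with h | h | h
      · exact h2a (lt_trans hca h)
      · exact h2a (h ▸ hca)
      · exact h1a h

theorem lexB_true_cases {a b : List (String × String)} (h : lexB a b = true) :
    eM a < eM b ∨ (¬ (eM b < eM a) ∧ uI a < uI b) := by
  simpa only [lexB, Bool.or_eq_true, Bool.and_eq_true, Bool.not_eq_true', decide_eq_true_eq,
    decide_eq_false_iff_not] using h

theorem eM_not_lt_of_Rle {a b : List (String × String)} (h : Rle a b) : ¬ (eM b < eM a) := by
  simp only [Rle, lexB, Bool.or_eq_false_iff, Bool.and_eq_false_iff, Bool.not_eq_false',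
    decide_eq_true_eq, decide_eq_false_iff_not] at h
  exact h.1

theorem insertBy_of_all_before {x : List (String × String)} {l : List (List (String × String))}
    (h : ∀ z ∈ l, lexB x z = true) : PySem.List.insertBy lexB x l = x :: l := by
  cases l with
  | nil => rfl
  | cons y ys => simp [PySem.List.insertBy, h y (List.mem_cons_self)]

theorem pairwise_insertBy {x : List (String × String)} {l : List (List (String × String))}
    (h : l.Pairwise Rle) : (PySem.List.insertBy lexB x l).Pairwise Rle := by
  induction l with
  | nil => simp [PySem.List.insertBy]
  | cons y ys ih =>
    rw [List.pairwise_cons] at h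
    by_cases hxy : lexB x y = true
    · simp only [PySem.List.insertBy, hxy, if_true]
      refine List.Pairwise.cons ?_ (List.Pairwise.cons h.1 h.2)
      intro z hz
      rcases List.mem_cons.mp hz with rfl | hz
      · exact lexB_asymm hxy
      · by_contra hc
        simp only [Rle, Bool.not_eq_false] at hc
        exact absurd (h.1 z hz) (by simp [Rle, lexB_trans hc hxy])
    · simp only [PySem.List.insertBy, hxy, Bool.false_eq_true, if_false]
      refine List.Pairwise.cons ?_ (ih h.2)
      intro z hz
      rcases (PySem.List.mem_insertBy _ _ _ _).mp hz with rfl | hz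
      · simpa [Rle] using hxy
      · exact h.1 z hz

theorem filter_insertBy (p : List (String × String) → Bool) (x : List (String × String))
    (l : List (List (String × String))) (h : l.Pairwise Rle) :
    (PySem.List.insertBy lexB x l).filter p =
      if p x then PySem.List.insertBy lexB x (l.filter p) else l.filter p := by
  induction l with
  | nil => cases hp : p x <;> simp [PySem.List.insertBy, hp]
  | cons y ys ih =>
    rw [List.pairwise_cons] at h
    by_cases hxy : lexB x y = true
    · simp only [PySem.List.insertBy, hxy, if_true]
      by_cases hpx : p x = true
      · rw [List.filter_cons_of_pos hpx, if_pos hpx]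
        refine (insertBy_of_all_before ?_).symm
        intro z hz
        rcases List.mem_cons.mp (List.mem_of_mem_filter hz) with rfl | hz'
        · exact hxy
        · exact lexB_trans_neg hxy (h.1 z hz')
      · rw [List.filter_cons_of_neg (by simpa using hpx), if_neg (by simpa using hpx)]
    · simp only [PySem.List.insertBy, hxy, Bool.false_eq_true, if_false]
      by_cases hpy : p y = true
      · rw [List.filter_cons_of_pos hpy, List.filter_cons_of_pos hpy, ih h.2]
        by_cases hpx : p x = true
        · rw [if_pos hpx, if_pos hpx]
          simp [PySem.List.insertBy, hxy]
        · rw [if_neg (by simpa using hpx), if_neg (by simpa using hpx)]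
      · rw [List.filter_cons_of_neg (by simpa using hpy),
            List.filter_cons_of_neg (by simpa using hpy), ih h.2]

theorem dF_insertBy (x : List (String × String)) (l : List (List (String × String)))
    (h : l.Pairwise Rle) : dF (PySem.List.insertBy lexB x l) = upd x (dF l) := by
  match l with
  | [] => simp [PySem.List.insertBy, dF, upd]
  | y :: ys =>
    rw [List.pairwise_cons] at h
    by_cases hxy : lexB x y = true
    · simp only [PySem.List.insertBy, hxy, if_true]
      by_cases hlt : eM x < eM y
      · have hall : ∀ z ∈ y :: ys, (!(eM z == eM x)) = true := by
          intro z hz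
          rcases List.mem_cons.mp hz with rfl | hz'
          · simp [hlt.ne']
          · have h1 : ¬ (eM z < eM y) := eM_not_lt_of_Rle (h.1 z hz')
            have h2 : eM x < eM z := lt_of_lt_of_le hlt (not_lt.mp h1)
            simp [h2.ne']
        rw [dF, List.filter_eq_self.mpr hall, dF]
        simp [upd, hlt, hlt.ne']
      · have heq : eM x = eM y := by
          rcases lexB_true_cases hxy with hc | ⟨hc, _⟩
          · exact absurd hc hlt
          · exact le_antisymm (not_lt.mp hc) (not_lt.mp hlt)
        have hu : uI x < uI y := by
          rcases lexB_true_cases hxy with hc | ⟨_, hc⟩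
          · exact absurd hc hlt
          · exact hc
        rw [dF, List.filter_cons_of_neg (by simp [heq]), dF]
        simp [upd, heq, hu]
    · simp only [PySem.List.insertBy, hxy, Bool.false_eq_true, if_false]
      have hnlt : ¬ (eM x < eM y) := by
        intro hc
        exact hxy (by simp [lexB, hc])
      by_cases he : eM x = eM y
      · have hnu : ¬ (uI x < uI y) := by
          intro hc
          exact hxy (by simp [lexB, he, hc])
        rw [dF, filter_insertBy _ _ _ h.2, if_neg (by simp [he]), dF]
        simp [upd, he, hnu]
      · have he' : eM y ≠ eM x := fun hh => he hh.symm
        rw [dF, filter_insertBy _ _ _ h.2, if_pos (by simp [he]),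
            dF_insertBy x (ys.filter (fun z => !(eM z == eM y))) (h.2.filter _), dF]
        simp [upd, he', hnlt]
termination_by l.length
decreasing_by simp only [List.length_cons]; exact Nat.lt_succ_of_le (List.length_filter_le _ _)

theorem foldlA_snd (l : List (List (String × String))) (s : PySem.Set String)
    (acc : List (List (String × String))) :
    (l.foldl
      (fun (st : PySem.Set String × List (List (String × String))) row =>
        if PySem.Set.contains st.1 (pvGet row "email") then st
        else (PySem.Set.add st.1 (pvGet row "email"), st.2 ++ [row])) (s, acc)).2
      = acc ++ dFs s l := by
  induction l generalizing s acc with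
  | nil => simp [dFs]
  | cons r rs ih =>
    by_cases hc : PySem.Set.contains s (pvGet r "email") = true
    · simp only [List.foldl_cons, hc, if_true, dFs, eM, ih]
    · simp only [List.foldl_cons, hc, Bool.false_eq_true, if_false, dFs, eM, ih,
        List.append_assoc, List.singleton_append]

theorem dFs_eq_dF (l : List (List (String × String))) (s : PySem.Set String) :
    dFs s l = dF (l.filter (fun r => !(PySem.Set.contains s (eM r)))) := by
  induction l generalizing s with
  | nil => simp [dFs, dF]
  | cons r rs ih =>
    by_cases hc : PySem.Set.contains s (eM r) = true
    · rw [dFs, if_pos hc, List.filter_cons_of_neg (by simp; exact (PySem.Set.contains_iff _ _).mp hc), ih]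
    · rw [dFs, if_neg hc,
        List.filter_cons_of_pos (by simp; exact fun hh => hc ((PySem.Set.contains_iff _ _).mpr hh)),
        dF, ih, List.filter_filter]
      congr 2
      apply List.filter_congr
      intro z _
      by_cases hz : eM z = eM r <;> simp [hz]

theorem dF_foldl_insertBy (l : List (List (String × String))) (acc : List (List (String × String)))
    (h : acc.Pairwise Rle) :
    dF (l.foldl (fun acc x => PySem.List.insertBy lexB x acc) acc) =
      l.foldl (fun out row => upd row out) (dF acc) := by
  induction l generalizing acc with
  | nil => rfl
  | cons r rs ih =>
    rw [List.foldl_cons, List.foldl_cons, ih _ (pairwise_insertBy h), dF_insertBy _ _ h]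

def eLt (a b : List (String × String)) : Prop := eM a < eM b

theorem mem_upd {z x : List (String × String)} {out : List (List (String × String))}
    (h : z ∈ upd x out) : z = x ∨ z ∈ out := by
  induction out with
  | nil => simpa [upd] using h
  | cons r rs ih =>
    rw [upd] at h
    split at h
    · split at h
      · rcases List.mem_cons.mp h with rfl | hz
        · exact Or.inl rfl
        · exact Or.inr (List.mem_cons_of_mem _ hz)
      · exact Or.inr h
    · split at h
      · rcases List.mem_cons.mp h with rfl | hz
        · exact Or.inl rfl
        · exact Or.inr hz
      · rcases List.mem_cons.mp h with rfl | hz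
        · exact Or.inr (List.mem_cons_self)
        · rcases ih hz with h1 | h1
          · exact Or.inl h1
          · exact Or.inr (List.mem_cons_of_mem _ h1)

theorem pairwise_upd {x : List (String × String)} {out : List (List (String × String))}
    (h : out.Pairwise eLt) : (upd x out).Pairwise eLt := by
  induction out with
  | nil => simp [upd]
  | cons r rs ih =>
    rw [List.pairwise_cons] at h
    rw [upd]
    by_cases hbe : (eM r == eM x) = true
    · have he : eM r = eM x := beq_iff_eq.mp hbe
      rw [if_pos hbe]
      by_cases hu : uI x < uI r
      · rw [if_pos hu]
        refine List.Pairwise.cons (fun z hz => ?_) h.2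
        have h1 := h.1 z hz
        simp only [eLt, he] at h1
        exact h1
      · rw [if_neg hu]
        exact List.Pairwise.cons h.1 h.2
    · have hne : eM r ≠ eM x := by simpa using hbe
      rw [if_neg hbe]
      by_cases hlt : eM x < eM r
      · rw [if_pos hlt]
        refine List.Pairwise.cons ?_ (List.Pairwise.cons h.1 h.2)
        intro z hz
        rcases List.mem_cons.mp hz with rfl | hz'
        · exact hlt
        · exact lt_trans hlt (h.1 z hz')
      · rw [if_neg hlt]
        refine List.Pairwise.cons ?_ (ih h.2)
        intro z hz
        rcases mem_upd hz with rfl | hz'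
        · exact lt_of_le_of_ne (not_lt.mp hlt) hne
        · exact h.1 z hz' 

theorem pairwise_foldl_upd (l : List (List (String × String)))
    (out : List (List (String × String))) (h : out.Pairwise eLt) :
    (l.foldl (fun out row => upd row out) out).Pairwise eLt := by
  induction l generalizing out with
  | nil => exact h
  | cons r rs ih => exact ih _ (pairwise_upd h)

theorem pairwise_Phi (value : List (List (String × String))) : (Phi value).Pairwise eLt :=
  pairwise_foldl_upd value [] List.Pairwise.nil

theorem fB_upd_ne {e : String} {x : List (String × String)} {out : List (List (String × String))}
    (h : eM x ≠ e) : fB e (upd x out) = fB e out := by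
  induction out with
  | nil => simp [upd, fB, h]
  | cons r rs ih =>
    rw [upd]
    by_cases hbe : (eM r == eM x) = true
    · have he : eM r = eM x := beq_iff_eq.mp hbe
      rw [if_pos hbe]
      by_cases hu : uI x < uI r
      · rw [if_pos hu]
        simp only [fB]
        rw [List.find?_cons_of_neg (by simp [h]), List.find?_cons_of_neg (by simp [he, h])]
      · rw [if_neg hu]
    · rw [if_neg hbe]
      by_cases hlt : eM x < eM r
      · rw [if_pos hlt]
        simp only [fB]
        rw [List.find?_cons_of_neg (by simp [h])]
      · rw [if_neg hlt]
        simp only [fB]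
        by_cases hre : (eM r == e) = true
        · rw [List.find?_cons_of_pos (p := fun r => eM r == e) hre,
              List.find?_cons_of_pos (p := fun r => eM r == e) hre]
        · rw [List.find?_cons_of_neg (by simpa using hre), List.find?_cons_of_neg (by simpa using hre)]
          exact ih

theorem fB_upd_self {x : List (String × String)} {out : List (List (String × String))}
    (h : out.Pairwise eLt) :
    fB (eM x) (upd x out) =
      some (match fB (eM x) out with
            | none => x
            | some c => if uI x < uI c then x else c) := by
  induction out with
  | nil => simp [upd, fB]
  | cons r rs ih =>
    rw [List.pairwise_cons] at h
    rw [upd]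
    by_cases hbe : (eM r == eM x) = true
    · rw [if_pos hbe]
      have hfr : fB (eM x) (r :: rs) = some r := by
        simp only [fB]
        rw [List.find?_cons_of_pos (p := fun z => eM z == eM x) hbe]
      rw [hfr]
      by_cases hu : uI x < uI r
      · rw [if_pos hu]
        simp only [fB]
        rw [List.find?_cons_of_pos (p := fun z => eM z == eM x) (by simp), if_pos hu]
      · rw [if_neg hu]
        simp only [fB]
        rw [List.find?_cons_of_pos (p := fun z => eM z == eM x) hbe, if_neg hu]
    · have hne : eM r ≠ eM x := by simpa using hbe
      rw [if_neg hbe]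
      by_cases hlt : eM x < eM r
      · rw [if_pos hlt]
        have hnone : fB (eM x) (r :: rs) = none := by
          simp only [fB]
          rw [List.find?_eq_none]
          intro z hz
          rcases List.mem_cons.mp hz with rfl | hz'
          · simpa using hne
          · have h1 := h.1 z hz'
            simp only [eLt] at h1
            simp [(lt_trans hlt h1).ne']
        rw [hnone]
        simp only [fB]
        rw [List.find?_cons_of_pos (p := fun z => eM z == eM x) (by simp)]
      · rw [if_neg hlt]
        simp only [fB]
        rw [List.find?_cons_of_neg (by simpa using hbe), List.find?_cons_of_neg (by simpa using hbe)]
        exact ih h.2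

theorem chosen_get? (l : List (List (String × String)))
    (d : PySem.Dict String (List (String × String))) (out : List (List (String × String)))
    (hd : ∀ e, d.get? e = fB e out) (hp : out.Pairwise eLt) (e : String) :
    (l.foldl
      (fun (d : PySem.Dict String (List (String × String))) row =>
        d.insert (pvGet row "email")
          (match d.get? (pvGet row "email") with
           | none => row
           | some cur => if pvGet row "user_id" < pvGet cur "user_id" then row else cur)) d).get? e
      = fB e (l.foldl (fun out row => upd row out) out) := by
  induction l generalizing d out with
  | nil => exact hd e
  | cons row rows ih =>
    rw [List.foldl_cons, List.foldl_cons]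
    refine ih _ _ (fun e' => ?_) (pairwise_upd hp)
    by_cases he' : e' = pvGet row "email"
    · subst he'
      rw [PySem.Dict.get?_insert_self, hd, eM_def, fB_upd_self hp]
      rfl
    · rw [PySem.Dict.get?_insert_of_ne, hd, fB_upd_ne]
      · intro hh
        exact he' (by rw [← hh]; rfl)
      · exact he' 

theorem fB_self_of_mem {r : List (String × String)} {l : List (List (String × String))}
    (hp : l.Pairwise eLt) (h : r ∈ l) : fB (eM r) l = some r := by
  induction l with
  | nil => cases h
  | cons r0 rs ih =>
    rw [List.pairwise_cons] at hp
    rcases List.mem_cons.mp h with rfl | hm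
    · simp only [fB]
      rw [List.find?_cons_of_pos (p := fun z => eM z == eM r) (by simp)]
    · have h1 := hp.1 r hm
      simp only [eLt] at h1
      simp only [fB]
      rw [List.find?_cons_of_neg (by simp [h1.ne])]
      exact ih hp.2 hm

theorem portA_eq_Phi (value : List (List (String × String))) :
    dedupe_recipient_targets_py value = Phi value := by
  unfold dedupe_recipient_targets_py
  rw [foldlA_snd, List.nil_append, dFs_eq_dF,
      List.filter_eq_self.mpr (fun a _ => by simp [PySem.Set.contains, PySem.Set.empty])]
  have hs : PySem.List.sorted2 value (fun r => pvGet r "email") (fun r => pvGet r "user_id")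
      = value.foldl (fun acc x => PySem.List.insertBy lexB x acc) [] := rfl
  rw [hs, dF_foldl_insertBy value [] List.Pairwise.nil]
  simp [Phi, dF]

theorem portB_eq_Phi (value : List (List (String × String))) :
    dedupe_recipient_targets_py_alt value = Phi value := by
  unfold dedupe_recipient_targets_py_alt
  have hfun : (fun (d : PySem.Dict String (List (String × String))) row =>
      let email := pvGet row "email"
      d.insert email
        (match d.get? email with
         | none => row
         | some cur => if pvGet row "user_id" < pvGet cur "user_id" then row else cur))
      = (fun (d : PySem.Dict String (List (String × String))) row =>
          d.insert (pvGet row "email")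
            (match d.get? (pvGet row "email") with
             | none => row
             | some cur => if pvGet row "user_id" < pvGet cur "user_id" then row else cur)) := rfl
  rw [hfun]
  set chosen := value.foldl
    (fun (d : PySem.Dict String (List (String × String))) row =>
      d.insert (pvGet row "email")
        (match d.get? (pvGet row "email") with
         | none => row
         | some cur => if pvGet row "user_id" < pvGet cur "user_id" then row else cur))
    PySem.Dict.empty with hch
  have hkeys : chosen.keys = PySem.Set.ofList (value.map (fun r => pvGet r "email")) := by
    rw [hch, PySem.Dict.keys_foldl_insert_key, PySem.Dict.keys_empty, PySem.Set.update_nil_left]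
  have hnodup : chosen.keys.Nodup := by
    rw [hch]
    exact PySem.Dict.nodup_keys_foldl_insert_key _ _ _ _ (by simp [PySem.Dict.keys_empty])
  have hget : ∀ e, chosen.get? e = fB e (Phi value) := by
    intro e
    rw [hch]
    exact chosen_get? value PySem.Dict.empty [] (fun e' => by simp [fB, PySem.Dict.get?_empty])
      List.Pairwise.nil e
  have hpairmap : ((Phi value).map eM).Pairwise (· < ·) :=
    List.pairwise_map.mpr (pairwise_Phi value)
  have hmemE : ∀ e, e ∈ PySem.Set.ofList (value.map (fun r => pvGet r "email"))
      ↔ e ∈ (Phi value).map eM := by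
    intro e
    rw [← hkeys]
    constructor
    · intro hm
      have hne : chosen.get? e ≠ none := fun hnone =>
        ((PySem.Dict.get?_eq_none_iff_not_mem_keys chosen e).mp hnone) hm
      rw [hget] at hne
      rcases Option.ne_none_iff_exists'.mp hne with ⟨r, hr⟩
      have hrm := List.mem_of_find?_eq_some hr
      have hre : eM r = e := by simpa using List.find?_some hr
      exact List.mem_map.mpr ⟨r, hrm, hre⟩
    · intro hm
      rcases List.mem_map.mp hm with ⟨r, hrm, hre⟩
      by_contra hnm
      have : chosen.get? e = none := (PySem.Dict.get?_eq_none_iff_not_mem_keys chosen e).mpr hnm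
      rw [hget] at this
      rw [fB, List.find?_eq_none] at this
      exact this r hrm (by simp [hre])
  have hperm : (PySem.Set.ofList (value.map (fun r => pvGet r "email"))).Perm
      ((Phi value).map eM) := by
    rw [List.perm_ext_iff_of_nodup (PySem.Set.nodup_ofList _)
      (hpairmap.imp ne_of_lt)]
    exact hmemE
  have hvals : chosen.values = chosen.keys.map (fun k => chosen.getD k []) :=
    PySem.Dict.values_eq_map_keys chosen hnodup []
  have hgPhi : ∀ r ∈ Phi value, chosen.getD (eM r) [] = r := by
    intro r hr
    rw [PySem.Dict.getD_eq_get?_getD, hget, fB_self_of_mem (pairwise_Phi value) hr]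
    rfl
  have hvperm : chosen.values.Perm (Phi value) := by
    rw [hvals, hkeys]
    have h1 := hperm.map (fun k => chosen.getD k [])
    have h2 : ((Phi value).map eM).map (fun k => chosen.getD k []) = Phi value := by
      rw [List.map_map]
      exact List.map_congr_left (fun r hr => hgPhi r hr) |>.trans (List.map_id _) |>.symm ▸ rfl
    rw [h2] at h1
    exact h1
  exact PySem.List.sorted_eq_of_perm_of_pairwise_lt _ _ _ hvperm.symm (pairwise_Phi value)

-- ===== VERDICT (by name: the statement is the Claim_ definition above) =====
theorem dedupe_recipient_targets_py_spec : Claim_equal_dedupe_recipient_targets_py := by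
  intro value _ _
  unfold Spec_dedupe_recipient_targets_py
  rw [portA_eq_Phi, portB_eq_Phi]
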